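-- pv_equiv track=rewrite | github.com/Tillsunset/VSCodeProjects | Python/decodePyramid.py | decodePyramid
-- ===== SOURCE A (Python) =====
-- def decodePyramid(key):
--     decodedMessage = ""
--     i = 2
--     j = 1
--     while j < len(key):
--         decodedMessage += key[j] + " "
--         j += i
--         i += 1
--
--     return decodedMessage
-- ===== SOURCE B (Python) =====
-- def is_selected(idx):
--     lo, hi = 1, idx
--     while lo < hi:
--         mid = (lo + hi) // 2
--         if mid * (mid + 1) // 2 < idx:
--             lo = mid + 1
--         else:
--             hi = mid
--     return lo * (lo + 1) // 2 == idx
--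
--
-- def decodePyramid(key):
--     return "".join(key[i] + " " for i in range(len(key)) if is_selected(i))
-- ===== Notes on version B (the rewrite author's own statement) =====
-- stated objective: alternative
-- what changed: B traverses every index of the string once and keeps those passing a standalone triangular-number membership test done by binary search (least m with m*(m+1)//2 >= idx), joining the selected pieces, instead of A's jump iteration that steps the index j by a growing increment and concatenates onto a string.
import Mathlib
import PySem

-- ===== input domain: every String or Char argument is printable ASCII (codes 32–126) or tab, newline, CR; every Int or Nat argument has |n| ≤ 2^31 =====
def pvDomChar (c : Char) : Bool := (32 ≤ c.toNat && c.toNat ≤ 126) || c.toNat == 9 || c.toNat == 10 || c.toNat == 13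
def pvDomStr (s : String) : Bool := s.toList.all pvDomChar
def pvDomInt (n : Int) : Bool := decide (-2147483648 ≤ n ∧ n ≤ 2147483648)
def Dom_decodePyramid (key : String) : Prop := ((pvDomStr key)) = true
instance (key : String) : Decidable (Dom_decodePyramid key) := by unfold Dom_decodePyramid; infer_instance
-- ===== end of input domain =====

-- B scans every index of the string once, keeping those that pass a binary-search
-- triangular-number membership test, instead of A's jump iteration with a growing
-- increment (objective: alternative; not measured faster).

-- ===== PORT A =====
-- while j < len(key): decodedMessage += key[j] + " "; j += i; i += 1
-- fuel = len(key)+1 only makes the loop total; j increases by i ≥ 2 each step, so it suffices.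
def pvLoopA (key : List Char) : Nat → Nat → Nat → String → String
  | 0, _, _, acc => acc
  | fuel + 1, i, j, acc =>
    if j < key.length then
      pvLoopA key fuel (i + 1) (j + i) (acc ++ String.ofList [key.getD j ' ', ' '])
    else acc

def decodePyramid (key : String) : String :=
  pvLoopA key.toList (key.toList.length + 1) 2 1 ""

-- ===== PORT B =====
-- is_selected(idx): lo, hi = 1, idx; while lo < hi: mid = (lo+hi)//2;
--   if mid*(mid+1)//2 < idx: lo = mid+1 else: hi = mid;  return lo*(lo+1)//2 == idx
-- fuel = idx only makes the bisection total (hi - lo starts at idx - 1 and shrinks each step).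
def pvBSLoop (idx : Nat) : Nat → Nat → Nat → Nat
  | 0, lo, _ => lo
  | fuel + 1, lo, hi =>
    if lo < hi then
      if (lo + hi) / 2 * ((lo + hi) / 2 + 1) / 2 < idx then
        pvBSLoop idx fuel ((lo + hi) / 2 + 1) hi
      else
        pvBSLoop idx fuel lo ((lo + hi) / 2)
    else lo

def pvIsSelected (idx : Nat) : Bool :=
  pvBSLoop idx idx 1 idx * (pvBSLoop idx idx 1 idx + 1) / 2 == idx

-- "".join(key[i] + " " for i in range(len(key)) if is_selected(i))
def decodePyramid_alt (key : String) : String :=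
  String.join (((List.range key.toList.length).filter pvIsSelected).map
    (fun i => String.ofList [key.toList.getD i ' ', ' ']))

-- ===== PRECONDITION & SPEC =====
def Spec_decodePyramid (key : String) (out : String) : Prop := out = decodePyramid_alt key
instance (key : String) (out : String) : Decidable (Spec_decodePyramid key out) := by unfold Spec_decodePyramid; infer_instance

-- ===== CLAIM (what is proved, stated in full; the proofs are below) =====
def Claim_equal_decodePyramid : Prop := ∀ (key : String), Dom_decodePyramid key → Spec_decodePyramid key (decodePyramid key)

-- ===== LEMMAS AND PROOFS =====

theorem pvTri_succ (n : Nat) : (n + 1) * (n + 2) / 2 = n * (n + 1) / 2 + (n + 1) := by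
  obtain ⟨k, hk⟩ := Nat.even_mul_succ_self n
  have h2 : (n + 1) * (n + 2) = n * (n + 1) + 2 * (n + 1) := by ring
  omega

theorem pvTri_mono : StrictMono (fun n : Nat => n * (n + 1) / 2) := by
  apply strictMono_nat_of_lt_succ
  intro n
  have h : (n + 1) * (n + 1 + 1) = (n + 1) * (n + 2) := by ring
  simp only [h, pvTri_succ]
  omega

theorem pvTri_ge (m : Nat) : m ≤ m * (m + 1) / 2 := by
  obtain ⟨k, hk⟩ := Nat.even_mul_succ_self m
  have h2 : m * (m + 1) = m * m + m := by ring
  rcases Nat.eq_zero_or_pos m with h0 | hpos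
  · omega
  · have hmm : m ≤ m * m := Nat.le_mul_of_pos_left m hpos
    omega

theorem pvBSLoop_iff (idx : Nat) (fuel : Nat) : ∀ (lo hi : Nat), 1 ≤ lo → hi ≤ lo + fuel →
    (∀ m, 1 ≤ m → m < lo → m * (m + 1) / 2 < idx) →
    (∀ k, 1 ≤ k → k * (k + 1) / 2 = idx → k ≤ hi) →
    (pvBSLoop idx fuel lo hi * (pvBSLoop idx fuel lo hi + 1) / 2 = idx ↔
      ∃ k, 1 ≤ k ∧ k * (k + 1) / 2 = idx) := by
  induction fuel with
  | zero =>
    intro lo hi hlo hfuel hbelow habove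
    simp only [pvBSLoop]
    constructor
    · intro h; exact ⟨lo, hlo, h⟩
    · rintro ⟨k, hk1, hkT⟩
      have hkhi := habove k hk1 hkT
      rcases Nat.lt_or_ge k lo with hlt | hge
      · exact absurd hkT (Nat.ne_of_lt (hbelow k hk1 hlt))
      · have hkl : k = lo := by omega
        rw [← hkl]; exact hkT
  | succ f ih =>
    intro lo hi hlo hfuel hbelow habove
    by_cases hlh : lo < hi
    · simp only [pvBSLoop, if_pos hlh]
      by_cases hmid : (lo + hi) / 2 * ((lo + hi) / 2 + 1) / 2 < idx
      · rw [if_pos hmid]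
        refine ih ((lo + hi) / 2 + 1) hi (by omega) (by omega) ?_ habove
        intro m hm1 hm2
        have hmono : m * (m + 1) / 2 ≤ (lo + hi) / 2 * ((lo + hi) / 2 + 1) / 2 :=
          pvTri_mono.monotone (by omega : m ≤ (lo + hi) / 2)
        omega
      · rw [if_neg hmid]
        refine ih lo ((lo + hi) / 2) hlo (by omega) hbelow ?_
        intro k hk1 hkT
        by_contra hc
        have hmono : (lo + hi) / 2 * ((lo + hi) / 2 + 1) / 2 < k * (k + 1) / 2 :=
          pvTri_mono (by omega : (lo + hi) / 2 < k)
        omega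
    · simp only [pvBSLoop, if_neg hlh]
      constructor
      · intro h; exact ⟨lo, hlo, h⟩
      · rintro ⟨k, hk1, hkT⟩
        have hkhi := habove k hk1 hkT
        rcases Nat.lt_or_ge k lo with hlt | hge
        · exact absurd hkT (Nat.ne_of_lt (hbelow k hk1 hlt))
        · have hkl : k = lo := by omega
          rw [← hkl]; exact hkT

theorem pvIsSelected_iff (idx : Nat) :
    pvIsSelected idx = true ↔ ∃ k, 1 ≤ k ∧ k * (k + 1) / 2 = idx := by
  unfold pvIsSelected
  rw [beq_iff_eq]
  exact pvBSLoop_iff idx idx 1 idx (le_refl 1) (by omega)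
    (fun m hm1 hm2 => absurd hm2 (by omega))
    (fun k hk1 hkT => le_trans (pvTri_ge k) (le_of_eq hkT))

theorem pvIsSelected_tri {n : Nat} (hn : 1 ≤ n) : pvIsSelected (n * (n + 1) / 2) = true :=
  (pvIsSelected_iff _).mpr ⟨n, hn, rfl⟩

theorem pvIsSelected_between {n i : Nat} (h1 : n * (n + 1) / 2 < i)
    (h2 : i < (n + 1) * (n + 2) / 2) : pvIsSelected i = false := by
  rw [← Bool.not_eq_true]
  intro h
  obtain ⟨k, hk, hT⟩ := (pvIsSelected_iff i).mp h
  have hlt : n < k := by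
    by_contra hc
    have := (pvTri_mono.le_iff_le).mpr (Nat.le_of_not_lt hc)
    simp only at this
    omega
  have : k * (k + 1) / 2 ≥ (n + 1) * (n + 1 + 1) / 2 := by
    have := (pvTri_mono.le_iff_le).mpr hlt
    simpa using this
  have he : (n + 1) * (n + 1 + 1) = (n + 1) * (n + 2) := by ring
  omega

theorem pvIsSelected_zero : pvIsSelected 0 = false := by decide

theorem pvFilter_skip (d : Nat) : ∀ (a cnt : Nat),
    (∀ i, a ≤ i → i < a + d → pvIsSelected i = false) →
    List.filter pvIsSelected (List.range' a (d + cnt)) =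
      List.filter pvIsSelected (List.range' (a + d) cnt) := by
  induction d with
  | zero => intro a cnt _; simp
  | succ e ih =>
    intro a cnt hno
    have h1' : e + 1 + cnt = (e + cnt) + 1 := by omega
    rw [h1', List.range'_succ, List.filter_cons]
    have hx : pvIsSelected a = false := hno a (le_refl a) (by omega)
    simp only [hx, Bool.false_eq_true, if_false]
    have hy : a + (e + 1) = a + 1 + e := by omega
    rw [hy, ih (a + 1) cnt (fun i hi1 hi2 => hno i (by omega) (by omega))]

theorem pvLoopA_pull (key : List Char) :
    ∀ (fuel i j : Nat) (acc : String),
      pvLoopA key fuel i j acc = acc ++ pvLoopA key fuel i j "" := by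
  intro fuel
  induction fuel with
  | zero => intro i j acc; simp [pvLoopA]
  | succ f ih =>
    intro i j acc
    by_cases h : j < key.length
    · simp only [pvLoopA, if_pos h]
      rw [ih _ _ (acc ++ _), ih _ _ ("" ++ _)]
      simp [String.append_assoc]
    · simp [pvLoopA, if_neg h]

theorem pvFoldl_append (l : List String) :
    ∀ a : String, List.foldl (fun r s => r ++ s) a l = a ++ List.foldl (fun r s => r ++ s) "" l := by
  induction l with
  | nil => intro a; simp
  | cons t l ih =>
    intro a
    simp only [List.foldl]
    rw [ih (a ++ t), ih ("" ++ t)]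
    simp [String.append_assoc]

theorem pvJoin_cons (s : String) (l : List String) :
    String.join (s :: l) = s ++ String.join l := by
  simp only [String.join, List.foldl]
  rw [pvFoldl_append]
  simp

theorem pvMain (key : List Char) : ∀ (fuel n : Nat), 1 ≤ n →
    key.length ≤ n * (n + 1) / 2 + fuel →
    pvLoopA key fuel (n + 1) (n * (n + 1) / 2) "" =
      String.join (((List.range' (n * (n + 1) / 2) (key.length - n * (n + 1) / 2)).filter
        pvIsSelected).map (fun i => String.ofList [key.getD i ' ', ' '])) := by
  intro fuel
  induction fuel with
  | zero =>
    intro n hn hf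
    have h0 : key.length - n * (n + 1) / 2 = 0 := by omega
    simp [pvLoopA, h0, String.join]
  | succ f ih =>
    intro n hn hf
    by_cases h : n * (n + 1) / 2 < key.length
    · simp only [pvLoopA, if_pos h]
      rw [pvLoopA_pull]
      have h2 : (n + 1) * (n + 1 + 1) = (n + 1) * (n + 2) := by ring
      have htr := pvTri_succ n
      have harg : n * (n + 1) / 2 + (n + 1) = (n + 1) * (n + 1 + 1) / 2 := by omega
      rw [harg, ih (n + 1) (by omega) (by omega)]
      have hS : (n + 1) * (n + 1 + 1) / 2 = n * (n + 1) / 2 + (n + 1) := by omega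
      rw [hS]
      have hsplit : key.length - n * (n + 1) / 2 = (key.length - n * (n + 1) / 2 - 1) + 1 := by
        generalize n * (n + 1) / 2 = T at h ⊢
        omega
      rw [hsplit, List.range'_succ, List.filter_cons]
      simp only [pvIsSelected_tri hn, if_true]
      have hd : key.length - n * (n + 1) / 2 - 1 =
          (key.length - n * (n + 1) / 2 - 1 - (key.length - (n * (n + 1) / 2 + (n + 1)))) +
            (key.length - (n * (n + 1) / 2 + (n + 1))) := by
        generalize n * (n + 1) / 2 = T at h ⊢
        omega
      rw [hd, pvFilter_skip
            (key.length - n * (n + 1) / 2 - 1 - (key.length - (n * (n + 1) / 2 + (n + 1))))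
            (n * (n + 1) / 2 + 1) (key.length - (n * (n + 1) / 2 + (n + 1)))
            (fun i hi1 hi2 => pvIsSelected_between (n := n)
              (by generalize n * (n + 1) / 2 = T at hi1 h ⊢; omega)
              (by rw [htr]; generalize n * (n + 1) / 2 = T at hi2 h ⊢; omega))]
      have hrange : List.range'
            (n * (n + 1) / 2 + 1 +
              (key.length - n * (n + 1) / 2 - 1 - (key.length - (n * (n + 1) / 2 + (n + 1)))))
            (key.length - (n * (n + 1) / 2 + (n + 1))) =
          List.range' (n * (n + 1) / 2 + (n + 1))
            (key.length - (n * (n + 1) / 2 + (n + 1))) := by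
        rcases Nat.eq_zero_or_pos (key.length - (n * (n + 1) / 2 + (n + 1))) with h0 | hp
        · rw [h0]; rfl
        · have heq : n * (n + 1) / 2 + 1 +
              (key.length - n * (n + 1) / 2 - 1 - (key.length - (n * (n + 1) / 2 + (n + 1)))) =
              n * (n + 1) / 2 + (n + 1) := by
            generalize n * (n + 1) / 2 = T at h hp ⊢
            omega
          rw [heq]
      rw [hrange]
      simp only [List.map_cons, pvJoin_cons]
      simp
    · have hc : key.length - n * (n + 1) / 2 = 0 := by omega
      simp [pvLoopA, if_neg h, hc, String.join]

-- ===== VERDICT (by name: the statement is the Claim_ definition above) =====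
theorem decodePyramid_spec : Claim_equal_decodePyramid := by
  intro key _
  unfold Spec_decodePyramid decodePyramid decodePyramid_alt
  set l := key.toList with hl
  rcases Nat.eq_zero_or_pos l.length with h0 | hpos
  · simp [pvLoopA, h0, String.join]
  · have hmain := pvMain l (l.length + 1) 1 (le_refl 1) (by omega)
    norm_num at hmain
    have hsplit : l.length = 1 + (l.length - 1) := by omega
    conv_rhs => rw [List.range_eq_range', hsplit]
    rw [pvFilter_skip 1 0 (l.length - 1) (fun i hi1 hi2 => by
      have h0' : i = 0 := by omega
      rw [h0']; exact pvIsSelected_zero)]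
    simpa using hmain
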